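-- pv_equiv track=rewrite | github.com/thamara/time-to-leave | scripts/check-languages.py | find_equal_values
-- ===== SOURCE A (Python) =====
-- def find_equal_values(keys_to_ignore : list, baseline_scope : dict, scope : dict) -> dict:
--     translations_baseline = baseline_scope.items()
--     translations = scope.items()
--     different_items = translations_baseline - translations
--     for item in different_items:
--         if item[0] in scope:
--             scope.pop(item[0])
--
--     for key_to_ignore in keys_to_ignore:
--         if key_to_ignore in scope:
--             scope.pop(key_to_ignore)
--
--     return scope
-- ===== SOURCE B (Python) =====
-- def find_equal_values(keys_to_ignore : list, baseline_scope : dict, scope : dict) -> dict: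
--     # Build the list of entries to KEEP (the complement condition), walking scope
--     # back-to-front, then rewrite scope in place with the kept entries.
--     ignore = set(keys_to_ignore)
--     kept = []
--     for key, value in reversed(list(scope.items())):
--         if key in ignore:
--             continue
--         if key in baseline_scope and baseline_scope[key] != value:
--             continue
--         kept.append((key, value))
--     kept.reverse()
--     scope.clear()
--     scope.update(kept)
--     return scope
-- ===== Notes on version B (the rewrite author's own statement) =====
-- stated objective: alternative
-- what changed: Instead of A's two removal loops (a set-difference of dict items driving guarded pops, then pops for keys_to_ignore), B walks scope back-to-front building the list of entries to KEEP via the complement predicate (with keys_to_ignore as a set) and rewrites scope with clear/update; no pop is performed at all.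
import Mathlib
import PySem

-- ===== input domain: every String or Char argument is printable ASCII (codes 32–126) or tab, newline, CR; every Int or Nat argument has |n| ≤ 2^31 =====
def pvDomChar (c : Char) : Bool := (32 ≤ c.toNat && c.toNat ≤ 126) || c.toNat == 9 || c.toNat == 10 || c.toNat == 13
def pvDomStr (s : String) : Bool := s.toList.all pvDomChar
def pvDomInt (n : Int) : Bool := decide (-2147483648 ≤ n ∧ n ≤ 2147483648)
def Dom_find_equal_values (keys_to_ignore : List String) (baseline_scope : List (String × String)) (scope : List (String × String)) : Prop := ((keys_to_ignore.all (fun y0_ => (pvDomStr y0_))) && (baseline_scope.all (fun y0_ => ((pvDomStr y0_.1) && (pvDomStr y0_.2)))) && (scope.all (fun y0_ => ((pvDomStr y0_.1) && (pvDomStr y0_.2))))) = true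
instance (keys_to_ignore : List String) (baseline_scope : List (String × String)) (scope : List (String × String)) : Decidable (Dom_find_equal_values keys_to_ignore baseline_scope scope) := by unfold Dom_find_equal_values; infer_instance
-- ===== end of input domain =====

-- B replaces A's two removal loops (items set-difference driving guarded pops, then pops for
-- keys_to_ignore) by a back-to-front pass over scope that builds the entries to KEEP and rewrites
-- scope (objective: alternative). Both Pythons mutate `scope` in place; the equivalence proved
-- here is about the RETURN value.


-- ===== PORT A =====
-- scope.pop(k): remove the (first) entry with key k
def pvPopKey (s : List (String × String)) (k : String) : List (String × String) :=
  s.eraseP (fun p => p.1 == k)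

def find_equal_values (keys_to_ignore : List String) (baseline_scope : List (String × String)) (scope : List (String × String)) : List (String × String) :=
  -- different_items = baseline_scope.items() - scope.items(); Python's set iteration order is
  -- unspecified, so iterating in baseline order is a faithful choice.
  let different_items := baseline_scope.filter (fun p => !(scope.contains p))
  let scope1 := different_items.foldl
    (fun s item => if s.any (fun q => q.1 == item.1) then pvPopKey s item.1 else s) scope
  keys_to_ignore.foldl
    (fun s key_to_ignore => if s.any (fun q => q.1 == key_to_ignore) then pvPopKey s key_to_ignore else s) scope1

-- ===== PORT B =====
-- the loop body: `key in ignore` is Set membership; `key in baseline_scope and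
-- baseline_scope[key] != value` is ported by one find? (present, and its value differs).
def pvKeepStep (ignore : PySem.Set String) (baseline_scope : List (String × String))
    (acc : List (String × String)) (p : String × String) : List (String × String) :=
  if PySem.Set.contains ignore p.1 then acc
  else
    match baseline_scope.find? (fun q => q.1 == p.1) with
    | some q => if q.2 != p.2 then acc else acc ++ [p]
    | none => acc ++ [p]

def find_equal_values_alt (keys_to_ignore : List String) (baseline_scope : List (String × String)) (scope : List (String × String)) : List (String × String) :=
  let ignore := PySem.Set.ofList keys_to_ignore
  -- for key, value in reversed(list(scope.items())): … kept.append((key, value))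
  let kept := scope.reverse.foldl (pvKeepStep ignore baseline_scope) []
  -- kept.reverse(); scope.clear(); scope.update(kept): scope now holds exactly kept, reversed back
  kept.reverse

-- ===== PRECONDITION & SPEC =====
-- Pre_ restricts the two association lists to distinct keys: they stand for Python dicts, whose
-- keys are always unique, so no input A accepts is excluded.
def Pre_find_equal_values (keys_to_ignore : List String) (baseline_scope : List (String × String)) (scope : List (String × String)) : Prop :=
  (baseline_scope.map Prod.fst).Nodup ∧ (scope.map Prod.fst).Nodup
instance (keys_to_ignore : List String) (baseline_scope : List (String × String)) (scope : List (String × String)) : Decidable (Pre_find_equal_values keys_to_ignore baseline_scope scope) := by unfold Pre_find_equal_values; infer_instance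

def pvWitness_find_equal_values : List String × (List (String × String)) × (List (String × String)) :=
  (["x"], [("a", "1"), ("b", "2")], [("a", "1"), ("b", "3"), ("x", "4")])

def Spec_find_equal_values (keys_to_ignore : List String) (baseline_scope : List (String × String)) (scope : List (String × String)) (out : List (String × String)) : Prop := out = find_equal_values_alt keys_to_ignore baseline_scope scope
instance (keys_to_ignore : List String) (baseline_scope : List (String × String)) (scope : List (String × String)) (out : List (String × String)) : Decidable (Spec_find_equal_values keys_to_ignore baseline_scope scope out) := by unfold Spec_find_equal_values; infer_instance

-- ===== CLAIM (what is proved, stated in full; the proofs are below) =====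
def Claim_equal_find_equal_values : Prop := ∀ (keys_to_ignore : List String) (baseline_scope : List (String × String)) (scope : List (String × String)), Dom_find_equal_values keys_to_ignore baseline_scope scope → Pre_find_equal_values keys_to_ignore baseline_scope scope → Spec_find_equal_values keys_to_ignore baseline_scope scope (find_equal_values keys_to_ignore baseline_scope scope)

-- ===== LEMMAS AND PROOFS =====

-- baseline_scope.get-like helper, used only in proofs to state both removal conditions uniformly
def pvGetDefault (base : List (String × String)) (k dflt : String) : String :=
  match base.find? (fun q => q.1 == k) with
  | some q => q.2
  | none => dflt

-- with unique keys, popping a key is filtering it out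
theorem pv_eraseP_eq_filter (s : List (String × String)) (k : String)
    (h : (s.map Prod.fst).Nodup) :
    s.eraseP (fun p => p.1 == k) = s.filter (fun p => !(p.1 == k)) := by
  induction s with
  | nil => rfl
  | cons a rest ih =>
    simp only [List.map_cons, List.nodup_cons] at h
    by_cases hk : a.1 = k
    · have hb : (a.1 == k) = true := beq_iff_eq.mpr hk
      simp only [List.eraseP_cons, List.filter_cons, hb, Bool.not_true, cond_true,
        Bool.false_eq_true, if_false]
      rw [List.filter_eq_self.mpr]
      intro p hp
      simp only [Bool.not_eq_eq_eq_not, Bool.not_true, beq_eq_false_iff_ne, ne_eq]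
      intro hpk
      exact h.1 (by rw [hk, ← hpk]; exact List.mem_map_of_mem hp)
    · have hb : (a.1 == k) = false := beq_eq_false_iff_ne.mpr hk
      simp [hb, ih h.2]

theorem pv_nodup_keys_filter {s : List (String × String)} (f : String × String → Bool)
    (h : (s.map Prod.fst).Nodup) : ((s.filter f).map Prod.fst).Nodup :=
  h.sublist ((s.filter_sublist (p := f)).map Prod.fst)

-- folding pops over a list of keys filters all of them out
theorem pv_foldl_erase_eq_filter (L : List String) (s : List (String × String))
    (h : (s.map Prod.fst).Nodup) :
    L.foldl (fun s k => s.eraseP (fun p => p.1 == k)) s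
      = s.filter (fun p => !(L.contains p.1)) := by
  induction L generalizing s with
  | nil => simp
  | cons k0 L ih =>
    simp only [List.foldl_cons]
    rw [pv_eraseP_eq_filter s k0 h, ih _ (pv_nodup_keys_filter _ h), List.filter_filter]
    apply List.filter_congr
    intro p _
    simp only [List.contains_cons, Bool.not_or]
    rw [Bool.and_comm, BEq.comm]

-- the guarded pop of port A is the plain eraseP
theorem pv_guard_eq (s : List (String × String)) (k : String) :
    (if s.any (fun q => q.1 == k) then pvPopKey s k else s)
      = s.eraseP (fun p => p.1 == k) := by
  by_cases hc : s.any (fun q => q.1 == k) = true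
  · simp [hc, pvPopKey]
  · rw [if_neg hc, List.eraseP_of_forall_not]
    intro a ha
    simp only [List.any_eq_true, not_exists, not_and] at hc
    exact fun hb => (hc a ha) hb

-- keys of elements are injective when the key list is Nodup
theorem pv_key_inj {s : List (String × String)} (h : (s.map Prod.fst).Nodup)
    {p q : String × String} (hp : p ∈ s) (hq : q ∈ s) (hk : p.1 = q.1) : p = q :=
  List.inj_on_of_nodup_map h hp hq hk

theorem pv_find?_of_mem {base : List (String × String)} (h : (base.map Prod.fst).Nodup)
    {k v : String} (hm : (k, v) ∈ base) :
    base.find? (fun q => q.1 == k) = some (k, v) := by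
  have hs : (base.find? (fun q => q.1 == k)).isSome := by
    rw [List.find?_isSome]
    exact ⟨(k, v), hm, by simp⟩
  obtain ⟨q, hq⟩ := Option.isSome_iff_exists.mp hs
  have hqm : q ∈ base := List.mem_of_find?_eq_some hq
  have hqk : q.1 = k := by simpa using List.find?_some hq
  rw [hq, pv_key_inj h hqm hm (by simpa using hqk)]

-- A's removal condition coincides with B's drop condition, for entries of scope
theorem pv_mem_KA_iff {base scope : List (String × String)}
    (hb : (base.map Prod.fst).Nodup) (hs : (scope.map Prod.fst).Nodup)
    {p : String × String} (hp : p ∈ scope) :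
    (p.1 ∈ (base.filter (fun q => !(scope.contains q))).map Prod.fst)
      ↔ pvGetDefault base p.1 p.2 ≠ p.2 := by
  constructor
  · rintro hmem
    obtain ⟨q, hq, hqk⟩ := List.mem_map.mp hmem
    obtain ⟨hqb, hqf⟩ := List.mem_filter.mp hq
    have hq1 : q.1 = p.1 := hqk
    have hfind : base.find? (fun r => r.1 == p.1) = some (p.1, q.2) := by
      have : (p.1, q.2) ∈ base := by
        have : q = (p.1, q.2) := by
          cases q; simp_all
        exact this ▸ hqb
      exact pv_find?_of_mem hb this
    unfold pvGetDefault
    rw [hfind]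
    intro hv
    have : q ∈ scope := by
      have hqp : q = p := by
        cases q; cases p; simp_all
      exact hqp ▸ hp
    simp [this] at hqf
  · intro hne
    unfold pvGetDefault at hne
    cases hfind : base.find? (fun r => r.1 == p.1) with
    | none => rw [hfind] at hne; exact absurd rfl hne
    | some q =>
      rw [hfind] at hne
      have hqm : q ∈ base := List.mem_of_find?_eq_some hfind
      have hqk : q.1 = p.1 := by simpa using List.find?_some hfind
      refine List.mem_map.mpr ⟨q, List.mem_filter.mpr ⟨hqm, ?_⟩, hqk⟩
      simp only [Bool.not_eq_eq_eq_not, Bool.not_true, List.contains_eq_mem,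
        decide_eq_false_iff_not]
      intro hqs
      exact hne (congrArg Prod.snd (pv_key_inj hs hqs hp hqk))

theorem pv_foldl_pairs (l : List (String × String)) (s : List (String × String)) :
    l.foldl (fun s item => s.eraseP (fun p => p.1 == item.1)) s
      = (l.map Prod.fst).foldl (fun s k => s.eraseP (fun p => p.1 == k)) s := by
  induction l generalizing s with
  | nil => rfl
  | cons a l ih => simp [ih]

-- B's append loop is the filter by the keep predicate
theorem pvKeep_fold_eq_filter (kti : List String) (base : List (String × String))
    (s acc : List (String × String)) :
    s.foldl (pvKeepStep (PySem.Set.ofList kti) base) acc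
      = acc ++ s.filter (fun p => !(kti.contains p.1 || (pvGetDefault base p.1 p.2 != p.2))) := by
  induction s generalizing acc with
  | nil => simp
  | cons a rest ih =>
    obtain ⟨k, v⟩ := a
    simp only [List.foldl_cons, ih, List.filter_cons]
    by_cases hk : k ∈ kti
    · simp [pvKeepStep, PySem.Set.mem_ofList, hk]
    · cases hfind : base.find? (fun q => q.1 == k) with
      | none => simp [pvKeepStep, PySem.Set.mem_ofList, hk, hfind, pvGetDefault]
      | some q =>
        by_cases hv : q.2 = v
        · simp [pvKeepStep, PySem.Set.mem_ofList, hk, hfind, hv, pvGetDefault]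
        · simp [pvKeepStep, PySem.Set.mem_ofList, hk, hfind, hv, pvGetDefault]

-- ===== VERDICT (by name: the statement is the Claim_ definition above) =====
theorem find_equal_values_spec : Claim_equal_find_equal_values := by
  intro kti base scope _ hpre
  obtain ⟨hb, hs⟩ := hpre
  unfold Spec_find_equal_values find_equal_values find_equal_values_alt
  have hstepA : (fun (s : List (String × String)) (item : String × String) =>
      if s.any (fun q => q.1 == item.1) then pvPopKey s item.1 else s)
      = (fun s item => s.eraseP (fun p => p.1 == item.1)) := by
    funext s item; exact pv_guard_eq s item.1
  have hstepA2 : (fun (s : List (String × String)) (k : String) =>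
      if s.any (fun q => q.1 == k) then pvPopKey s k else s)
      = (fun s k => s.eraseP (fun p => p.1 == k)) := by
    funext s k; exact pv_guard_eq s k
  simp only [hstepA, hstepA2]
  rw [pv_foldl_pairs]
  rw [pv_foldl_erase_eq_filter _ _ hs,
      pv_foldl_erase_eq_filter _ _ (pv_nodup_keys_filter _ hs),
      List.filter_filter]
  show _ = (((scope.reverse.foldl (pvKeepStep (PySem.Set.ofList kti) base) []).reverse))
  rw [pvKeep_fold_eq_filter, List.nil_append, List.filter_reverse, List.reverse_reverse]
  apply List.filter_congr
  intro p hp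
  have h1 := pv_mem_KA_iff hb hs hp
  have h3 : (p.1 ∈ kti.filter (fun k => scope.any (fun q => q.1 == k))) ↔ p.1 ∈ kti := by
    rw [List.mem_filter]
    constructor
    · exact fun h => h.1
    · intro h
      exact ⟨h, List.any_eq_true.mpr ⟨p, hp, by simp⟩⟩
  simp only [List.contains_eq_mem] at h1 ⊢
  by_cases he : pvGetDefault base p.1 p.2 = p.2 <;>
    simp [he, h1, h3, Bool.not_or, Bool.and_comm]
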